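-- pv_equiv track=rewrite | github.com/networmix/TopoGen | topogen/scenario/striping.py | group_by_width
-- ===== SOURCE A (Python) =====
-- from typing import Any, Dict, List, Tuple
--
-- def group_by_width(names: List[str], width: int) -> List[List[str]]:
--     """Partition names into contiguous groups of size ``width``.
--
--     Raises:
--         ValueError: If ``width`` <= 0 or ``len(names) % width != 0``.
--     """
--
--     if width <= 0:
--         raise ValueError("striping.width must be positive")
--     total = len(names)
--     if total % width != 0:
--         raise ValueError(
--             f"Eligible device count {total} is not divisible by width {width}"
--         )
--     groups: List[List[str]] = []
--     for i in range(0, total, width):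
--         groups.append(names[i : i + width])
--     return groups
-- ===== SOURCE B (Python) =====
-- from typing import List
--
-- def group_by_width(names: List[str], width: int) -> List[List[str]]:
--     """Partition names into contiguous groups of size ``width``."""
--     if width <= 0:
--         raise ValueError("striping.width must be positive")
--     total = len(names)
--     if total % width != 0:
--         raise ValueError(
--             f"Eligible device count {total} is not divisible by width {width}"
--         )
--     groups: List[List[str]] = []
--     current: List[str] = []
--     for name in names:
--         current.append(name)
--         if len(current) == width:
--             groups.append(current)
--             current = []
--     return groups
-- ===== Notes on version B (the rewrite author's own statement) =====
-- stated objective: alternative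
-- what changed: Replaces the index-stepped loop that slices names[i:i+width] with a single element-wise pass that accumulates a current bucket and flushes it each time it reaches width.
import Mathlib
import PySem

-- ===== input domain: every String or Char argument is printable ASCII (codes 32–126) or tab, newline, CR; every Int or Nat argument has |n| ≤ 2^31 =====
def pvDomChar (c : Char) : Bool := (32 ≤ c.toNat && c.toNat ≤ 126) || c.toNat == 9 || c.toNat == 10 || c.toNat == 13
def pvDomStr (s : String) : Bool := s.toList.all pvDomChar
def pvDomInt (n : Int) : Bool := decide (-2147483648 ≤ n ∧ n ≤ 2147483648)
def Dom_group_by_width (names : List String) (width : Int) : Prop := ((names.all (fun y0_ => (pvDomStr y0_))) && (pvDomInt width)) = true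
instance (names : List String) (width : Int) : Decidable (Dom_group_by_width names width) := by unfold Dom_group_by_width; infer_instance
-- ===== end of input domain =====

-- B replaces A's index-stepped slicing loop with a single element-wise pass that
-- accumulates a current bucket and flushes it whenever it reaches `width` (alternative decomposition).


-- ===== PORT A =====
-- A: guard width <= 0 (raise), guard len % width != 0 (raise), then
-- for i in range(0, total, width): groups.append(names[i:i+width]).
-- The raising branches are excluded by Pre_; the port returns [] there.
def group_by_width (names : List String) (width : Int) : List (List String) :=
  if width ≤ 0 then []
  else
    let total : Int := PySem.List.len names
    if PySem.Int.mod total width ≠ 0 then []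
    else
      (PySem.List.pyRange 0 total width).foldl
        (fun groups i => groups ++ [PySem.List.slice names (some i) (some (i + width))]) []

-- ===== PORT B =====
-- B: one element-wise pass with state (groups, current); append each name to
-- current and flush current into groups when it reaches width.
def group_by_width_alt (names : List String) (width : Int) : List (List String) :=
  if width ≤ 0 then []
  else if PySem.Int.mod (PySem.List.len names) width ≠ 0 then []
  else
    (names.foldl
      (fun (st : List (List String) × List String) name =>
        let current := st.2 ++ [name]
        if (current.length : Int) = width then (st.1 ++ [current], [])
        else (st.1, current)) ([], [])).1

-- ===== PRECONDITION & SPEC =====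
-- Pre_: exactly the inputs where Python A returns (no ValueError): positive width dividing len(names).
def Pre_group_by_width (names : List String) (width : Int) : Prop :=
  0 < width ∧ PySem.Int.mod (PySem.List.len names) width = 0
instance (names : List String) (width : Int) : Decidable (Pre_group_by_width names width) := by
  unfold Pre_group_by_width; infer_instance

def pvWitness_group_by_width : List String × Int := (["a", "b", "c", "d"], 2)

def Spec_group_by_width (names : List String) (width : Int) (out : List (List String)) : Prop := out = group_by_width_alt names width
instance (names : List String) (width : Int) (out : List (List String)) : Decidable (Spec_group_by_width names width out) := by unfold Spec_group_by_width; infer_instance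

-- ===== CLAIM (what is proved, stated in full; the proofs are below) =====
def Claim_equal_group_by_width : Prop := ∀ (names : List String) (width : Int), Dom_group_by_width names width → Pre_group_by_width names width → Spec_group_by_width names width (group_by_width names width)

-- ===== LEMMAS AND PROOFS =====

-- Reference chunking: k groups of w elements, peeled from the front.
def pvChunks (w : Nat) : Nat → List String → List (List String)
  | 0, _ => []
  | k + 1, names => names.take w :: pvChunks w k (names.drop w)

-- B's inner step
def pvStep (w : Int) (st : List (List String) × List String) (name : String) :
    List (List String) × List String :=
  let current := st.2 ++ [name]
  if (current.length : Int) = w then (st.1 ++ [current], []) else (st.1, current)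

lemma pvStep_fold_group (w : Int) (c : List String) :
    ∀ (cur : List String) (g : List (List String)), c ≠ [] →
      ((cur.length : Int) + c.length = w) →
      c.foldl (pvStep w) (g, cur) = (g ++ [cur ++ c], []) := by
  induction c with
  | nil => intro _ _ h _; exact absurd rfl h
  | cons x c' ih =>
    intro cur g _ hlen
    simp only [List.foldl_cons]
    rcases eq_or_ne c' [] with rfl | hne
    · have hpush : ((cur.length : Int) + 1) = w := by simpa using hlen
      simp [pvStep, hpush]
    · have hlt : ¬ ((cur.length : Int) + 1) = w := by
        have hpos : 0 < c'.length := List.length_pos_iff.mpr hne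
        simp only [List.length_cons] at hlen
        push_cast at hlen
        omega
      have hstep : pvStep w (g, cur) x = (g, cur ++ [x]) := by simp [pvStep, hlt]
      rw [hstep, ih (cur ++ [x]) g hne (by
        simp only [List.length_append, List.length_cons, List.length_nil] at hlen ⊢
        push_cast at hlen ⊢
        omega)]
      simp

lemma pvB_fold (w : Nat) (hw : 0 < w) :
    ∀ (k : Nat) (names : List String) (g : List (List String)),
      names.length = w * k →
      names.foldl (pvStep w) (g, []) = (g ++ pvChunks w k names, []) := by
  intro k
  induction k with
  | zero =>
    intro names g hl
    simp only [Nat.mul_zero] at hl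
    rw [List.eq_nil_of_length_eq_zero hl]
    simp [pvChunks]
  | succ k ih =>
    intro names g hl
    rw [Nat.mul_succ] at hl
    have hle : w ≤ names.length := by omega
    have htk : (names.take w).length = w := by
      rw [List.length_take]; omega
    have hne : names.take w ≠ [] := by
      intro h; rw [h] at htk; simp at htk; omega
    rw [← List.take_append_drop w names, List.foldl_append]
    rw [pvStep_fold_group w (names.take w) [] g hne (by simp [htk])]
    rw [ih (names.drop w) (g ++ [[] ++ names.take w]) (by rw [List.length_drop]; omega)]
    simp only [pvChunks, List.take_append_drop]
    simp

lemma pvA_map (w : Nat) (hw : 0 < w) :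
    ∀ (k : Nat) (names : List String), names.length = w * k →
      (List.range k).map (fun j => (names.drop (w * j)).take w) = pvChunks w k names := by
  intro k
  induction k with
  | zero => intro names _; simp [pvChunks]
  | succ k ih =>
    intro names hl
    rw [Nat.mul_succ] at hl
    simp only [List.range_succ_eq_map, List.map_cons, List.map_map, Nat.mul_zero,
      List.drop_zero]
    rw [pvChunks]
    congr 1
    rw [← ih (names.drop w) (by rw [List.length_drop]; omega)]
    apply List.map_congr_left
    intro j _
    simp only [Function.comp_apply, List.drop_drop]
    congr 2
    rw [Nat.succ_eq_add_one, Nat.mul_succ]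
    omega

lemma pvRange_step (w : Nat) (hw : 0 < w) (k : Nat) :
    PySem.List.pyRange 0 ((w : Int) * k) w
      = (List.range k).map (fun j : Nat => (w : Int) * j) := by
  rw [PySem.List.pyRange_of_pos 0 ((w : Int) * k) (by exact_mod_cast hw)]
  have hdiv : (if (0 : Int) < (w : Int) * k then (((w : Int) * k - 0 + w - 1) / w).toNat else 0) = k := by
    split_ifs with h
    · have hne : (w : Int) ≠ 0 := by exact_mod_cast hw.ne'
      have h1 : (w : Int) * k - 0 + w - 1 = (w - 1) + k * w := by ring
      rw [h1, Int.add_mul_ediv_right _ _ hne,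
        Int.ediv_eq_zero_of_lt (by omega) (by omega)]
      simp
    · rcases Nat.eq_zero_or_pos k with rfl | hk
      · rfl
      · exact absurd (by exact_mod_cast Nat.mul_pos hw hk) h
  rw [hdiv]
  simp only [zero_add]

-- ===== VERDICT (by name: the statement is the Claim_ definition above) =====
theorem group_by_width_spec : Claim_equal_group_by_width := by
  intro names width _ hpre
  obtain ⟨hw, hmod⟩ := hpre
  unfold Spec_group_by_width group_by_width group_by_width_alt
  set w : Nat := width.toNat with hwdef
  have hwcast : width = (w : Nat) := by omega
  have hwpos : 0 < w := by omega
  rw [PySem.List.len_eq] at hmod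
  obtain ⟨k, hk⟩ : ∃ k, names.length = w * k := by
    have hd : width ∣ ((names.length : Nat) : Int) :=
      (PySem.Int.mod_eq_zero_iff_dvd _ _).mp hmod
    rw [hwcast] at hd
    obtain ⟨c, hc⟩ := hd
    have hc0 : 0 ≤ c := by
      by_contra hneg
      push Not at hneg
      have hlt : (w : Int) * c < 0 :=
        mul_neg_of_pos_of_neg (by exact_mod_cast hwpos) hneg
      have h0 : (0 : Int) ≤ (names.length : Int) := Int.natCast_nonneg _
      rw [hc] at h0
      omega
    refine ⟨c.toNat, ?_⟩
    have : (names.length : Int) = ((w * c.toNat : Nat) : Int) := by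
      rw [hc]; push_cast; congr 1; omega
    exact_mod_cast this
  simp only [if_neg (by omega : ¬ width ≤ 0), if_neg (by simp [PySem.List.len_eq, hmod] : ¬ PySem.Int.mod (PySem.List.len names) width ≠ 0)]
  -- B side: the inline lambda is pvStep
  have hB : (names.foldl
      (fun (st : List (List String) × List String) name =>
        let current := st.2 ++ [name]
        if (current.length : Int) = width then (st.1 ++ [current], []) else (st.1, current))
      ([], [])).1 = pvChunks w k names := by
    have : (fun (st : List (List String) × List String) name =>
        let current := st.2 ++ [name]
        if (current.length : Int) = width then (st.1 ++ [current], []) else (st.1, current))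
        = pvStep width := rfl
    rw [this, hwcast, pvB_fold w hwpos k names [] hk]
    simp
  rw [hB]
  -- A side
  have hlen : PySem.List.len names = (w : Int) * k := by
    rw [PySem.List.len_eq, hk]; push_cast; ring
  rw [hlen, hwcast, pvRange_step w hwpos k,
    PySem.List.foldl_append_eq_flatMap
      (fun i => [PySem.List.slice names (some i) (some (i + (w : Int)))])]
  have hslice : ∀ j : Nat, PySem.List.slice names (some ((w : Int) * j)) (some ((w : Int) * j + w))
      = (names.drop (w * j)).take w := by
    intro j
    have h1 : ((w : Int) * j) = ((w * j : Nat) : Int) := by push_cast; ring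
    rw [h1, PySem.List.slice_natCast_add]
  calc ([] : List (List String)) ++ ((List.range k).map (fun j : Nat => (w : Int) * j)).flatMap
        (fun i => [PySem.List.slice names (some i) (some (i + (w : Int)))])
      = (List.range k).map (fun j => (names.drop (w * j)).take w) := by
        rw [List.nil_append, List.flatMap_map, ← List.map_eq_flatMap]
        exact List.map_congr_left (fun j _ => hslice j)
    _ = pvChunks w k names := pvA_map w hwpos k names hk
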